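-- pv_equiv track=rewrite | github.com/itsmexp/UNICAL-FondamentiDiProgrammazione-1 | Programmi/R4.py | ricSost
-- ===== SOURCE A (Python) =====
-- def ricSost(l, x, somma):
--     occ = 0
--     while x in l:
--         l[l.index(x)] = 0
--         occ = occ + 1
--     if occ == 0:
--         return somma
--     else:
--         return ricSost(l, occ, somma+occ)
-- ===== SOURCE B (Python) =====
-- def ricSost(l, x, somma):
--     # Iterative re-implementation: count once, zero all matches in one pass,
--     # thread the accumulator through loop variables instead of tail recursion.
--     # Mutates l in place like the original.
--     while True:
--         occ = l.count(x)
--         if occ == 0: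
--             return somma
--         for i, v in enumerate(l):
--             if v == x:
--                 l[i] = 0
--         somma += occ
--         x = occ
-- ===== Notes on version B (the rewrite author's own statement) =====
-- stated objective: simpler
-- what changed: Replaces A's tail recursion with an explicit while-True loop threading x/somma through loop variables, and replaces the repeated `x in l` / `l.index(x)` scans (one full scan per occurrence) with a single count plus one zeroing pass per round.
import Mathlib
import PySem

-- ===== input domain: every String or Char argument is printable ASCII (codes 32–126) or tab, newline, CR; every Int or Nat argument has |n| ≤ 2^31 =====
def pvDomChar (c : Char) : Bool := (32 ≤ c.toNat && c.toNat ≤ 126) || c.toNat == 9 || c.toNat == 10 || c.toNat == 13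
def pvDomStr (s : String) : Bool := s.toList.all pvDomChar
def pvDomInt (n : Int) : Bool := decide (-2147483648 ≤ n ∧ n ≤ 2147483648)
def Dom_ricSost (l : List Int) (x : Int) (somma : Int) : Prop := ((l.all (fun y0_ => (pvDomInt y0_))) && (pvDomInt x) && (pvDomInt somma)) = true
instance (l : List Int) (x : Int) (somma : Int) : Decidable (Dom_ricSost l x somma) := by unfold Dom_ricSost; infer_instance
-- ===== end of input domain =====

-- B replaces A's tail recursion (and its repeated `l.index` scans) by a single
-- `while True` loop that counts once and zeroes all matches in one pass; objective: simpler.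
-- Both Pythons mutate l in place identically; the equivalence proved is about the return value.

-- ===== PORT A =====
-- l[l.index(x)] = 0 : replace the first occurrence of x by 0
def pvSetFirst0 : List Int → Int → List Int
  | [], _ => []
  | a :: t, x => if a = x then 0 :: t else a :: pvSetFirst0 t x

-- the inner `while x in l` loop, fuel-guarded (fuel only makes it total;
-- within Pre_ the fuel l.length is never exhausted)
def ricSostInner : Nat → List Int → Int → Int → List Int × Int
  | 0, l, _, occ => (l, occ)
  | fuel + 1, l, x, occ =>
    if x ∈ l then ricSostInner fuel (pvSetFirst0 l x) x (occ + 1) else (l, occ)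

-- the outer tail recursion, fuel-guarded the same way
def ricSostGo : Nat → List Int → Int → Int → Int
  | 0, _, _, somma => somma
  | fuel + 1, l, x, somma =>
    let r := ricSostInner l.length l x 0
    if r.2 = 0 then somma else ricSostGo fuel r.1 r.2 (somma + r.2)

def ricSost (l : List Int) (x : Int) (somma : Int) : Int :=
  ricSostGo (l.length + 1) l x somma

-- ===== PORT B =====
def ricSostAltGo : Nat → List Int → Int → Int → Int
  | 0, _, _, somma => somma
  | fuel + 1, l, x, somma =>
    let occ : Int := l.count x
    if occ = 0 then somma
    else ricSostAltGo fuel (l.map fun v => if v = x then 0 else v) occ (somma + occ)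

def ricSost_alt (l : List Int) (x : Int) (somma : Int) : Int :=
  ricSostAltGo (l.length + 1) l x somma

-- ===== PRECONDITION & SPEC =====
-- Pre_ excludes exactly x = 0 with 0 ∈ l, where the Python A loops forever (never returns).
def Pre_ricSost (l : List Int) (x : Int) (_somma : Int) : Prop := ¬ (x = 0 ∧ 0 ∈ l)
instance (l : List Int) (x : Int) (somma : Int) : Decidable (Pre_ricSost l x somma) := by
  unfold Pre_ricSost; infer_instance

def pvWitness_ricSost : List Int × Int × Int := ([1, 1, 2], 1, 0)

def Spec_ricSost (l : List Int) (x : Int) (somma : Int) (out : Int) : Prop := out = ricSost_alt l x somma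
instance (l : List Int) (x : Int) (somma : Int) (out : Int) : Decidable (Spec_ricSost l x somma out) := by unfold Spec_ricSost; infer_instance

-- ===== CLAIM (what is proved, stated in full; the proofs are below) =====
def Claim_equal_ricSost : Prop := ∀ (l : List Int) (x : Int) (somma : Int), Dom_ricSost l x somma → Pre_ricSost l x somma → Spec_ricSost l x somma (ricSost l x somma)

-- ===== LEMMAS AND PROOFS =====

theorem pvSetFirst0_map (l : List Int) (x : Int) (hx : x ≠ 0) :
    (pvSetFirst0 l x).map (fun v => if v = x then 0 else v)
      = l.map (fun v => if v = x then 0 else v) := by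
  induction l with
  | nil => rfl
  | cons a t ih =>
    by_cases h : a = x
    · simp [pvSetFirst0, h, Ne.symm hx]
    · simp [pvSetFirst0, h, ih]

theorem pvSetFirst0_count (l : List Int) (x : Int) (hx : x ≠ 0) (hmem : x ∈ l) :
    (pvSetFirst0 l x).count x + 1 = l.count x := by
  induction l with
  | nil => cases hmem
  | cons a t ih =>
    by_cases h : a = x
    · simp [pvSetFirst0, h, Ne.symm hx]
    · have hmem' : x ∈ t := by cases hmem with
        | head => exact absurd rfl h
        | tail _ h' => exact h'
      simp [pvSetFirst0, h, ih hmem']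

-- the inner loop computes (map-to-zero, occ + count) whenever it terminates in Python
theorem pvMap_id_of_notmem (l : List Int) (x : Int) (hnot : x ∉ l) :
    l.map (fun v => if v = x then 0 else v) = l := by
  conv_rhs => rw [← List.map_id l]
  apply List.map_congr_left
  intro a ha
  have : a ≠ x := fun h => hnot (h ▸ ha)
  simp [this]

theorem ricSostInner_eq (fuel : Nat) :
    ∀ (l : List Int) (x occ : Int), (x = 0 → x ∉ l) → l.count x ≤ fuel →
    ricSostInner fuel l x occ
      = (l.map (fun v => if v = x then 0 else v), occ + l.count x) := by
  induction fuel with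
  | zero =>
    intro l x occ h0 hc
    have hcnt : l.count x = 0 := Nat.le_zero.mp hc
    have hnot : x ∉ l := List.count_eq_zero.mp hcnt
    simp [ricSostInner, pvMap_id_of_notmem l x hnot, hcnt]
  | succ n ih =>
    intro l x occ h0 hc
    by_cases hmem : x ∈ l
    · have hx : x ≠ 0 := fun h => (h0 h) (h ▸ hmem)
      have hcnt := pvSetFirst0_count l x hx hmem
      have hle : (pvSetFirst0 l x).count x ≤ n := by omega
      rw [ricSostInner, if_pos hmem, ih _ _ _ (fun h => absurd h hx) hle,
          pvSetFirst0_map l x hx]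
      simp only [Prod.mk.injEq, true_and]
      omega
    · have hcnt : l.count x = 0 := List.count_eq_zero.mpr hmem
      simp [ricSostInner, hmem, pvMap_id_of_notmem l x hmem, hcnt]

theorem ricSostGo_eq (fuel : Nat) :
    ∀ (l : List Int) (x somma : Int), (x = 0 → x ∉ l) →
    ricSostGo fuel l x somma = ricSostAltGo fuel l x somma := by
  induction fuel with
  | zero => intro l x somma _; rfl
  | succ n ih =>
    intro l x somma h0
    have hc : l.count x ≤ l.length := List.count_le_length
    rw [ricSostGo, ricSostAltGo]
    rw [ricSostInner_eq l.length l x 0 h0 hc]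
    simp only [zero_add]
    by_cases hz : (l.count x : Int) = 0
    · simp [hz]
    · have hx' : l.count x ≠ 0 := fun h => hz (by exact_mod_cast congrArg (Nat.cast : Nat → Int) h)
      simp only [hz]
      apply ih
      intro h
      exact absurd h hz

theorem ricSost_spec' (l : List Int) (x somma : Int) (hpre : Pre_ricSost l x somma) :
    ricSost l x somma = ricSost_alt l x somma := by
  unfold ricSost ricSost_alt
  apply ricSostGo_eq
  intro h hmem
  exact hpre ⟨h, h ▸ hmem⟩

-- ===== VERDICT (by name: the statement is the Claim_ definition above) =====
theorem ricSost_spec : Claim_equal_ricSost := by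
  intro l x somma _ hpre
  unfold Spec_ricSost
  exact ricSost_spec' l x somma hpre
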